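-- pv_equiv track=rewrite | github.com/Ayyappan-1/Python-DSA-Practice | Heap/Max_Heap_Deletion.py | max_heap_deletion
-- ===== SOURCE A (Python) =====
-- def max_heap_deletion(heap):
--     length=len(heap)
--     if(length==0):
--         return heap
--     if(length==1):
--         heap.pop()
--         return heap
--     heap[0]=heap[length-1]
--     heap.pop()
--     length-=1
--     i=0
--     while True:
--         left=2*i+1
--         right=2*i+2
--         greatest=i
--         if(left<length and heap[greatest]<heap[left]):
--             greatest=left
--         if(right<length and heap[greatest]< heap[right]):
--             greatest=right
--         if(greatest==i):
--             break
--         heap[greatest],heap[i]=heap[i],heap[greatest]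
--         i=greatest
--     return heap
-- ===== SOURCE B (Python) =====
-- def max_heap_deletion(heap):
--     # mutates heap in place like A; two staged passes: compute the sift path
--     # of the moved value first, then shift child values up along that path
--     if not heap:
--         return heap
--     v = heap.pop()
--     if not heap:
--         return heap
--     path = _sift_path(heap, v)
--     for j in range(len(path) - 1):
--         heap[path[j]] = heap[path[j + 1]]
--     heap[path[-1]] = v
--     return heap
--
-- def _sift_path(heap, v):
--     n = len(heap)
--     path = [0]
--     i = 0
--     while True:
--         c, best = i, v
--         for j in (2 * i + 1, 2 * i + 2):
--             if j < n and best < heap[j]: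
--                 c, best = j, heap[j]
--         if c == i:
--             return path
--         path.append(c)
--         i = c
-- ===== Notes on version B (the rewrite author's own statement) =====
-- stated objective: alternative
-- what changed: Replaced A's one-pass swap-based while-loop sift-down by two staged passes: first compute the full sift path of the moved value (a list of indices) by reading the untouched array, then shift child values up along that path and write the moved value once at the end.
import Mathlib
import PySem

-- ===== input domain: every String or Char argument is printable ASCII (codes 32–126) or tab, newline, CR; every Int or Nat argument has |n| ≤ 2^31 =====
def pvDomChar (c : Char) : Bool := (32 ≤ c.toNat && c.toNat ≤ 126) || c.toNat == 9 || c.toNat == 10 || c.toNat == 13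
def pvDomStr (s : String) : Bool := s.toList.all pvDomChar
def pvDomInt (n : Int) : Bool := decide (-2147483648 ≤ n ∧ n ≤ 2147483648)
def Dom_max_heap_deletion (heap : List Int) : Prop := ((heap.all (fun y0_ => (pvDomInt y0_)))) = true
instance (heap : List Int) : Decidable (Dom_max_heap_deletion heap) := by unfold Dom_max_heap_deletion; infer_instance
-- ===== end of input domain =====

-- B replaces A's swap-based while-loop sift-down by two staged passes: compute the
-- full sift path first, then shift values up along it; objective: alternative
-- decomposition. Both Pythons mutate `heap` in place identically (same final
-- contents); the equivalence proved here is about the return value.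

-- ===== PORT A =====

-- the index chosen by one iteration of A's loop (A's two guarded strict `<`
-- comparisons, left first; indices read are guarded in range, so getD is exact)
def pvGreatestA (heap : List Int) (i : Nat) : Nat :=
  if 2*i+1 < heap.length ∧ heap.getD i 0 < heap.getD (2*i+1) 0 then
    if 2*i+2 < heap.length ∧ heap.getD (2*i+1) 0 < heap.getD (2*i+2) 0 then 2*i+2 else 2*i+1
  else
    if 2*i+2 < heap.length ∧ heap.getD i 0 < heap.getD (2*i+2) 0 then 2*i+2 else i

theorem pvGreatestA_lt (heap : List Int) (i : Nat) (h : pvGreatestA heap i ≠ i) :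
    i < pvGreatestA heap i ∧ pvGreatestA heap i < heap.length := by
  unfold pvGreatestA at h ⊢
  split_ifs at h ⊢ <;> omega

-- A's `while True` swap loop
def pvSiftA (heap : List Int) (i : Nat) : List Int :=
  if _h : pvGreatestA heap i = i then heap
  else pvSiftA
    ((heap.set (pvGreatestA heap i) (heap.getD i 0)).set i (heap.getD (pvGreatestA heap i) 0))
    (pvGreatestA heap i)
termination_by heap.length - i
decreasing_by
  have := pvGreatestA_lt heap i _h
  simp only [List.length_set]
  omega

def max_heap_deletion (heap : List Int) : List Int :=
  if heap.length = 0 then heap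
  else if heap.length = 1 then heap.dropLast     -- heap.pop() on a singleton
  else pvSiftA ((heap.set 0 (heap.getD (heap.length - 1) 0)).dropLast) 0

-- ===== PORT B =====

-- the body of `_sift_path`'s inner `for j in (left, right)` loop
def pvStepB (heap : List Int) (p : Nat × Int) (j : Nat) : Nat × Int :=
  if j < heap.length ∧ p.2 < heap.getD j 0 then (j, heap.getD j 0) else p

-- one round of `_sift_path`: fold the two children through pvStepB
def pvCandB (heap : List Int) (i : Nat) (v : Int) : Nat × Int :=
  pvStepB heap (pvStepB heap (i, v) (2*i+1)) (2*i+2)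

theorem pvCandB_lt (heap : List Int) (i : Nat) (v : Int)
    (h : (pvCandB heap i v).1 ≠ i) :
    i < (pvCandB heap i v).1 ∧ (pvCandB heap i v).1 < heap.length := by
  unfold pvCandB pvStepB at h ⊢
  split_ifs at h ⊢ <;> simp_all <;> omega

-- `_sift_path`, building the index list front-to-back
def pvPathB (heap : List Int) (i : Nat) (v : Int) : List Nat :=
  if _h : (pvCandB heap i v).1 = i then [i]
  else i :: pvPathB heap (pvCandB heap i v).1 v
termination_by heap.length - i
decreasing_by
  have := pvCandB_lt heap i v _h
  omega

-- the shifting pass: `heap[path[j]] = heap[path[j+1]]` for consecutive pairs,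
-- then `heap[path[-1]] = v`
def pvShiftB (heap : List Int) (path : List Nat) (v : Int) : List Int :=
  match path with
  | [] => heap
  | [i] => heap.set i v
  | i :: j :: rest => pvShiftB (heap.set i (heap.getD j 0)) (j :: rest) v

def max_heap_deletion_alt (heap : List Int) : List Int :=
  if heap.isEmpty then heap
  else
    let v := heap.getD (heap.length - 1) 0       -- heap.pop()
    let rest := heap.dropLast
    if rest.isEmpty then rest
    else pvShiftB rest (pvPathB rest 0 v) v

-- ===== PRECONDITION & SPEC =====
def Spec_max_heap_deletion (heap : List Int) (out : List Int) : Prop := out = max_heap_deletion_alt heap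
instance (heap : List Int) (out : List Int) : Decidable (Spec_max_heap_deletion heap out) := by unfold Spec_max_heap_deletion; infer_instance

-- ===== CLAIM (what is proved, stated in full; the proofs are below) =====
def Claim_equal_max_heap_deletion : Prop := ∀ (heap : List Int), Dom_max_heap_deletion heap → Spec_max_heap_deletion heap (max_heap_deletion heap)

-- ===== LEMMAS AND PROOFS =====

theorem set_getD_self (l : List Int) (i : Nat) : l.set i (l.getD i 0) = l := by
  apply List.ext_getElem (by simp)
  intro j hj hj'
  rw [List.getElem_set]
  split
  · next h => subst h; simp [List.getD, List.getElem?_eq_getElem hj']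
  · rfl

theorem getD_set_ne (l : List Int) (i j : Nat) (x : Int) (h : j ≠ i) :
    (l.set i x).getD j 0 = l.getD j 0 := by
  simp [List.getD, List.getElem?_set_ne (by omega : i ≠ j)]

theorem getD_set_self (l : List Int) (i : Nat) (x : Int) (h : i < l.length) :
    (l.set i x).getD i 0 = x := by
  simp [List.getD, List.getElem?_set_self h]

-- pvCandB only reads length and the two child slots 2i+1, 2i+2 > i ≥ j
theorem pvCandB_set_le (l : List Int) (j i : Nat) (x v : Int) (h : j ≤ i) :
    pvCandB (l.set j x) i v = pvCandB l i v := by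
  unfold pvCandB pvStepB
  rw [List.length_set, getD_set_ne l j (2*i+1) x (by omega),
    getD_set_ne l j (2*i+2) x (by omega)]

-- hence the whole path ignores slots at or above-left of its start
theorem pvPathB_set_le (l : List Int) (j i : Nat) (x v : Int) (h : j ≤ i) :
    pvPathB (l.set j x) i v = pvPathB l i v := by
  rw [pvPathB.eq_def]
  conv_rhs => rw [pvPathB.eq_def]
  rw [pvCandB_set_le l j i x v h]
  split_ifs with hc
  · rfl
  · have := pvCandB_lt l i v hc
    rw [pvPathB_set_le l j (pvCandB l i v).1 x v (by omega)]
termination_by l.length - i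
decreasing_by
  have := pvCandB_lt l i v hc
  omega

theorem pvPathB_cons (heap : List Int) (i : Nat) (v : Int) :
    ∃ t, pvPathB heap i v = i :: t := by
  rw [pvPathB.eq_def]
  split_ifs
  · exact ⟨[], rfl⟩
  · exact ⟨_, rfl⟩

theorem pvPathB_chain (heap : List Int) (i : Nat) (v : Int) :
    List.IsChain (· < ·) (pvPathB heap i v) := by
  rw [pvPathB.eq_def]
  split_ifs with hc
  · exact List.isChain_singleton i
  · obtain ⟨t, ht⟩ := pvPathB_cons heap (pvCandB heap i v).1 v
    have hih := pvPathB_chain heap (pvCandB heap i v).1 v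
    rw [ht] at hih ⊢
    exact List.isChain_cons_cons.mpr ⟨(pvCandB_lt heap i v hc).1, hih⟩
termination_by heap.length - i
decreasing_by
  have := pvCandB_lt heap i v hc
  omega

-- the shifting pass overwrites the head slot before ever reading it
theorem pvShiftB_set_head (L : List Int) (g : Nat) (x v : Int) (rest : List Nat)
    (h : List.IsChain (· < ·) (g :: rest)) :
    pvShiftB (L.set g x) (g :: rest) v = pvShiftB L (g :: rest) v := by
  cases rest with
  | nil => simp [pvShiftB, List.set_set]
  | cons j rest' =>
    have hgj : g < j := (List.isChain_cons_cons.mp h).1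
    simp only [pvShiftB]
    rw [getD_set_ne L g j x (by omega), List.set_set]

-- the comparisons of one round of A's loop coincide with B's candidate step
-- when B's carried value is heap[i]
theorem pvCandB_eq_greatest (heap : List Int) (i : Nat) :
    (pvCandB heap i (heap.getD i 0)).1 = pvGreatestA heap i ∧
    (pvCandB heap i (heap.getD i 0)).2 = heap.getD (pvGreatestA heap i) 0 := by
  unfold pvCandB pvStepB pvGreatestA
  split_ifs <;> simp_all

-- main bridge: A's swap loop = B's path-then-shift, starting from val = heap[i]
theorem siftA_eq_pathShift (heap : List Int) (i : Nat) :
    pvSiftA heap i = pvShiftB heap (pvPathB heap i (heap.getD i 0)) (heap.getD i 0) := by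
  by_cases hgi : pvGreatestA heap i = i
  · rw [pvSiftA, dif_pos hgi, pvPathB,
      dif_pos ((pvCandB_eq_greatest heap i).1.trans hgi)]
    exact (set_getD_self heap i).symm
  · have hlt := pvGreatestA_lt heap i hgi
    set g := pvGreatestA heap i with hg
    set v := heap.getD i 0 with hv
    have hc1 : (pvCandB heap i v).1 = g := (pvCandB_eq_greatest heap i).1
    -- the heap after A's swap
    have hih := siftA_eq_pathShift ((heap.set g v).set i (heap.getD g 0)) g
    have hgv : ((heap.set g v).set i (heap.getD g 0)).getD g 0 = v := by
      rw [getD_set_ne _ i g _ (by omega), getD_set_self _ _ _ hlt.2]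
    rw [pvSiftA, dif_neg hgi, ← hg, ← hv, hih, hgv,
      pvPathB_set_le _ i g _ v (by omega), pvPathB_set_le _ g g _ v (le_refl g)]
    -- right-hand side: unfold one step of pvPathB and pvShiftB
    conv_rhs => rw [pvPathB.eq_def]
    rw [dif_neg (by rw [hc1]; exact hgi), hc1]
    obtain ⟨t, ht⟩ := pvPathB_cons heap g v
    rw [ht]
    simp only [pvShiftB]
    have hchain : List.IsChain (· < ·) (g :: t) := ht ▸ pvPathB_chain heap g v
    rw [List.set_comm _ _ (by omega : g ≠ i),
      pvShiftB_set_head _ g v v t hchain]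
termination_by heap.length - i
decreasing_by
  simp only [List.length_set]
  have := pvGreatestA_lt heap i hgi
  omega

theorem set_dropLast_comm (heap : List Int) (x : Int) :
    (heap.set 0 x).dropLast = heap.dropLast.set 0 x := by
  apply List.ext_getElem (by simp)
  intro j hj hj'
  rw [List.getElem_set, List.getElem_dropLast, List.getElem_dropLast, List.getElem_set]

-- ===== VERDICT (by name: the statement is the Claim_ definition above) =====
theorem max_heap_deletion_spec : Claim_equal_max_heap_deletion := by
  intro heap _
  unfold Spec_max_heap_deletion max_heap_deletion max_heap_deletion_alt
  by_cases h0 : heap.length = 0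
  · have : heap = [] := List.length_eq_zero_iff.mp h0
    subst this; rfl
  · have hne : heap.isEmpty = false := by
      cases heap with
      | nil => exact absurd rfl h0
      | cons a t => rfl
    by_cases h1 : heap.length = 1
    · have hre : heap.dropLast.isEmpty = true := by
        have hl : heap.dropLast.length = 0 := by rw [List.length_dropLast]; omega
        rw [List.length_eq_zero_iff.mp hl]; rfl
      simp [h1, hne, hre]
    · have h2 : 2 ≤ heap.length := by omega
      have hre : heap.dropLast.isEmpty = false := by
        have hd : heap.dropLast ≠ [] := by
          intro hnil
          have := congrArg List.length hnil
          rw [List.length_dropLast] at this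
          simp at this
          omega
        cases hd2 : heap.dropLast with
        | nil => exact absurd hd2 hd
        | cons a t => rfl
      simp only [h0, h1, hne, hre, if_false, Bool.false_eq_true]
      rw [siftA_eq_pathShift, set_dropLast_comm heap _,
        getD_set_self _ _ _ (by rw [List.length_dropLast]; omega),
        pvPathB_set_le _ 0 0 _ _ (le_refl 0)]
      obtain ⟨t, ht⟩ := pvPathB_cons heap.dropLast 0 (heap.getD (heap.length - 1) 0)
      rw [ht]
      exact pvShiftB_set_head _ 0 _ _ t (ht ▸ pvPathB_chain heap.dropLast 0 _)
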